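-- pv_equiv track=rewrite | github.com/prokokok/programmers | 이분탐색/예산탐색.py | cal_budgets
-- ===== SOURCE A (Python) =====
-- def cal_budgets(budgets, cap):
--     total = 0
--     for budget in budgets:
--         if budget < cap:
--             total += budget
--         if budget >= cap:
--             total += cap
--     return total
-- ===== SOURCE B (Python) =====
-- def cal_budgets(budgets, cap):
--     total = 0
--     s = sorted(budgets)
--     for i, b in enumerate(s):
--         if b >= cap:
--             return total + cap * (len(s) - i)
--         total += b
--     return total
-- ===== Notes on version B (the rewrite author's own statement) =====
-- stated objective: alternative
-- what changed: Sorts the budgets first, accumulates the sorted prefix of budgets below cap, and on the first sorted element reaching cap returns early, charging cap once per remaining element instead of continuing the scan.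
import Mathlib
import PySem

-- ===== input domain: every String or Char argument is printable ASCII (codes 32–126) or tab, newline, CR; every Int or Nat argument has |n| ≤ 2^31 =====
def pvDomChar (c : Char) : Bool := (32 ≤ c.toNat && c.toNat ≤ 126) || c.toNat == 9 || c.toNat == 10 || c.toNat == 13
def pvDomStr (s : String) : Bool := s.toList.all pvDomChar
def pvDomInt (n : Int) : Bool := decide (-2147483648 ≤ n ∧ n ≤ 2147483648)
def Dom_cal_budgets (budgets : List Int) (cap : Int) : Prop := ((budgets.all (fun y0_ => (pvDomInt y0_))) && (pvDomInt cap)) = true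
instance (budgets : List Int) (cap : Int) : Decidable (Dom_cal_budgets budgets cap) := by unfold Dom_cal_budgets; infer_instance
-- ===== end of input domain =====

-- B sorts first and charges cap for the whole remaining suffix on the first capped element;
-- objective: alternative (sort-then-prefix-scan with early exit instead of a per-element accumulation).

-- ===== PORT A =====
-- Port of A: fold over budgets with the two sequential if-branches.
def cal_budgets (budgets : List Int) (cap : Int) : Int :=
  budgets.foldl (fun total budget =>
    let total := if budget < cap then total + budget else total
    if budget ≥ cap then total + cap else total) 0

-- ===== PORT B =====
-- Port of B's loop: scan the sorted list; on the first element ≥ cap return early,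
-- adding cap once per remaining element (len(s) - i = rest.length + 1).
def calBudgetsGo (cap : Int) : List Int → Int → Int
  | [], total => total
  | b :: rest, total =>
      if b ≥ cap then total + cap * ((rest.length : Int) + 1)
      else calBudgetsGo cap rest (total + b)

-- Port of B: sorted(budgets) ported as mergeSort, then the early-exit scan.
def cal_budgets_alt (budgets : List Int) (cap : Int) : Int :=
  calBudgetsGo cap (budgets.mergeSort (· ≤ ·)) 0

-- ===== PRECONDITION & SPEC =====
def Spec_cal_budgets (budgets : List Int) (cap : Int) (out : Int) : Prop := out = cal_budgets_alt budgets cap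
instance (budgets : List Int) (cap : Int) (out : Int) : Decidable (Spec_cal_budgets budgets cap out) := by unfold Spec_cal_budgets; infer_instance

-- ===== CLAIM (what is proved, stated in full; the proofs are below) =====
def Claim_equal_cal_budgets : Prop := ∀ (budgets : List Int) (cap : Int), Dom_cal_budgets budgets cap → Spec_cal_budgets budgets cap (cal_budgets budgets cap)

-- ===== LEMMAS AND PROOFS =====

theorem sum_map_const_int (c : Int) (l : List Int) :
    (l.map (fun _ : Int => c)).sum = (l.length : Int) * c := by
  induction l with
  | nil => simp
  | cons x xs ihx =>
    simp only [List.map_cons, List.sum_cons, List.length_cons, ihx]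
    push_cast; ring

theorem foldl_shift (budgets : List Int) (cap : Int) (t : Int) :
    budgets.foldl (fun total budget =>
      let total := if budget < cap then total + budget else total
      if budget ≥ cap then total + cap else total) t
    = t + budgets.foldl (fun total budget =>
      let total := if budget < cap then total + budget else total
      if budget ≥ cap then total + cap else total) 0 := by
  induction budgets generalizing t with
  | nil => simp
  | cons b bs ih =>
    simp only [List.foldl_cons]
    rw [ih, ih (if b ≥ cap then _ else _)]
    split_ifs <;> ring

-- A computes the sum of min(b, cap).
theorem A_eq_sum (budgets : List Int) (cap : Int) :
    cal_budgets budgets cap = (budgets.map (fun b => min b cap)).sum := by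
  induction budgets with
  | nil => simp [cal_budgets]
  | cons b bs ih =>
    simp only [cal_budgets, List.foldl_cons] at *
    rw [foldl_shift, ih]
    simp only [List.map_cons, List.sum_cons]
    by_cases h : b < cap
    · have h2 : ¬ b ≥ cap := by omega
      have : min b cap = b := by omega
      simp [h, h2, this]
    · have h2 : b ≥ cap := by omega
      have hm : min b cap = cap := by omega
      simp [h, h2]

-- On a sorted list the early-exit scan computes the same sum of min(b, cap).
theorem go_sorted (cap : Int) (l : List Int) (t : Int)
    (hs : l.Pairwise (· ≤ ·)) :
    calBudgetsGo cap l t = t + (l.map (fun b => min b cap)).sum := by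
  induction l generalizing t with
  | nil => simp [calBudgetsGo]
  | cons b rest ih =>
    rcases List.pairwise_cons.mp hs with ⟨hb, hrest⟩
    simp only [calBudgetsGo, List.map_cons, List.sum_cons]
    by_cases h : b ≥ cap
    · have hmap : rest.map (fun x => min x cap) = rest.map (fun _ => cap) :=
        List.map_congr_left (fun x hx => by have := hb x hx; omega)
      have hmin : min b cap = cap := by omega
      rw [if_pos h, hmap, hmin, sum_map_const_int cap rest]
      ring
    · have hmin : min b cap = b := by omega
      rw [if_neg h, ih _ hrest]
      rw [hmin]; ring

theorem A_eq_B (budgets : List Int) (cap : Int) :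
    cal_budgets budgets cap = cal_budgets_alt budgets cap := by
  have hperm : (budgets.mergeSort (· ≤ ·)).Perm budgets := List.mergeSort_perm _ _
  have hsorted : (budgets.mergeSort (· ≤ ·)).Pairwise (· ≤ ·) := by
    have := List.pairwise_mergeSort (le := fun a b : Int => decide (a ≤ b))
      (fun a b c hab hbc => by simp_all; omega)
      (fun a b => by simp [Int.le_total]) budgets
    exact this.imp (fun h => by simpa using h)
  unfold cal_budgets_alt
  rw [go_sorted cap _ 0 hsorted, A_eq_sum]
  have := (hperm.map (fun b => min b cap)).sum_eq
  omega

-- ===== VERDICT (by name: the statement is the Claim_ definition above) =====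
theorem cal_budgets_spec : Claim_equal_cal_budgets := by
  intro budgets cap _
  unfold Spec_cal_budgets
  exact A_eq_B budgets cap
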